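-- pv_equiv track=rewrite | github.com/kquinsland/tools | ci/detect_tools_changes.py | summarize_changes
-- ===== SOURCE A (Python) =====
-- from typing import Any, Dict, List
--
-- def summarize_changes(
--     head_entries: Dict[str, Any], worktree_entries: Dict[str, Any]
-- ) -> str:
--     head_slugs = set(head_entries)
--     worktree_slugs = set(worktree_entries)
--
--     added = sorted(worktree_slugs - head_slugs)
--     removed = sorted(head_slugs - worktree_slugs)
--     updated: List[str] = []
--     for slug in sorted(head_slugs & worktree_slugs):
--         if head_entries[slug] != worktree_entries[slug]:
--             updated.append(slug)
--
--     parts: List[str] = []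
--     if added:
--         parts.append("added " + ", ".join(added))
--     if updated:
--         parts.append("updated " + ", ".join(updated))
--     if removed:
--         parts.append("removed " + ", ".join(removed))
--     return "; ".join(parts)
-- ===== SOURCE B (Python) =====
-- def summarize_changes(head_entries, worktree_entries):
--     # Merge-join: advance two cursors over the key-sorted item lists; no set
--     # operations or membership tests are needed.
--     hs = sorted(head_entries.items(), key=lambda kv: kv[0])
--     ws = sorted(worktree_entries.items(), key=lambda kv: kv[0])
--     added, updated, removed = [], [], []
--     i = j = 0
--     while i < len(hs) and j < len(ws):
--         (hk, hv), (wk, wv) = hs[i], ws[j]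
--         if hk < wk:
--             removed.append(hk)
--             i += 1
--         elif wk < hk:
--             added.append(wk)
--             j += 1
--         else:
--             if hv != wv:
--                 updated.append(hk)
--             i += 1
--             j += 1
--     removed.extend(k for k, _ in hs[i:])
--     added.extend(k for k, _ in ws[j:])
--     parts = []
--     if added:
--         parts.append("added " + ", ".join(added))
--     if updated:
--         parts.append("updated " + ", ".join(updated))
--     if removed:
--         parts.append("removed " + ", ".join(removed))
--     return "; ".join(parts)
-- ===== Notes on version B (the rewrite author's own statement) =====
-- stated objective: alternative
-- what changed: Replaces A's set algebra (two sorted set differences plus a sorted-intersection scan with dict lookups) by a two-cursor merge-join over the two key-sorted item lists, which needs no sets, no membership tests and no dict lookups.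
import Mathlib
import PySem

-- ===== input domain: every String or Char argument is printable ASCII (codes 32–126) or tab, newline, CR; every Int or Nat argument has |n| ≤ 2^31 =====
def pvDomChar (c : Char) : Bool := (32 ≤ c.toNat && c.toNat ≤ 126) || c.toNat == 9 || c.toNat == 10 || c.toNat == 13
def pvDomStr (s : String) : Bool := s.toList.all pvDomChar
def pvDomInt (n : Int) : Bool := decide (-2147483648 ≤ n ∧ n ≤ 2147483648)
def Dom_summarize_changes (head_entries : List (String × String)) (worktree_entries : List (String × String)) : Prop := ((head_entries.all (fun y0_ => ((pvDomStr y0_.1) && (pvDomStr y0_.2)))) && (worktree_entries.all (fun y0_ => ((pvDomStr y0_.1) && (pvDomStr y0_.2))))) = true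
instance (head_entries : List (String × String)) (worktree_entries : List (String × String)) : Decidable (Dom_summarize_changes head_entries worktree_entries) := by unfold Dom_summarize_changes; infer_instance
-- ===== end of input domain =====

-- B replaces A's set algebra by a two-cursor merge-join over the two key-sorted item lists
-- (alternative decomposition, same asymptotic cost).

-- ===== PORT A =====
-- lookups head_entries[slug] are ported as Dict.get?; A only performs them on keys present in both
-- dicts, where get? returns `some v`, so comparing the Options equals comparing the values.
def summarize_changes (head_entries : List (String × String)) (worktree_entries : List (String × String)) : String :=
  let head_slugs : PySem.Set String := PySem.Set.ofList (head_entries.map Prod.fst)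
  let worktree_slugs : PySem.Set String := PySem.Set.ofList (worktree_entries.map Prod.fst)
  let added := PySem.List.sorted (PySem.Set.diff worktree_slugs head_slugs) (fun x => x) false
  let removed := PySem.List.sorted (PySem.Set.diff head_slugs worktree_slugs) (fun x => x) false
  let updated :=
    (PySem.List.sorted (PySem.Set.inter head_slugs worktree_slugs) (fun x => x) false).foldl
      (fun acc slug =>
        if (PySem.Dict.mk head_entries).get? slug ≠ (PySem.Dict.mk worktree_entries).get? slug
        then acc ++ [slug] else acc) []
  let parts : List String := []
  let parts := if added ≠ [] then parts ++ ["added " ++ PySem.Str.join ", " added] else parts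
  let parts := if updated ≠ [] then parts ++ ["updated " ++ PySem.Str.join ", " updated] else parts
  let parts := if removed ≠ [] then parts ++ ["removed " ++ PySem.Str.join ", " removed] else parts
  PySem.Str.join "; " parts

-- ===== PORT B =====
-- the while loop of Source B: two cursors over the sorted item lists; advancing a cursor past an
-- element is consuming the head of the corresponding list; the trailing `extend`s are the base cases.
def pvMergeLoop : List (String × String) → List (String × String) →
    List String × List String × List String → List String × List String × List String
  | [], ws, acc => (acc.1 ++ ws.map Prod.fst, acc.2.1, acc.2.2)
  | hs, [], acc => (acc.1, acc.2.1, acc.2.2 ++ hs.map Prod.fst)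
  | (hk, hv) :: hs, (wk, wv) :: ws, acc =>
    if hk < wk then pvMergeLoop hs ((wk, wv) :: ws) (acc.1, acc.2.1, acc.2.2 ++ [hk])
    else if wk < hk then pvMergeLoop ((hk, hv) :: hs) ws (acc.1 ++ [wk], acc.2.1, acc.2.2)
    else pvMergeLoop hs ws (acc.1, if hv ≠ wv then acc.2.1 ++ [hk] else acc.2.1, acc.2.2)

def summarize_changes_alt (head_entries : List (String × String)) (worktree_entries : List (String × String)) : String :=
  let hs := PySem.List.sorted (PySem.Dict.mk head_entries).items (fun kv => kv.1) false
  let ws := PySem.List.sorted (PySem.Dict.mk worktree_entries).items (fun kv => kv.1) false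
  let buckets := pvMergeLoop hs ws ([], [], [])
  let added := buckets.1
  let updated := buckets.2.1
  let removed := buckets.2.2
  let parts : List String := []
  let parts := if added ≠ [] then parts ++ ["added " ++ PySem.Str.join ", " added] else parts
  let parts := if updated ≠ [] then parts ++ ["updated " ++ PySem.Str.join ", " updated] else parts
  let parts := if removed ≠ [] then parts ++ ["removed " ++ PySem.Str.join ", " removed] else parts
  PySem.Str.join "; " parts

-- ===== PRECONDITION & SPEC =====
-- The two arguments encode Python dicts, whose keys are necessarily distinct; a list with
-- duplicate keys represents no dict input A can receive, so Pre_ requires distinct keys.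
def Pre_summarize_changes (head_entries : List (String × String)) (worktree_entries : List (String × String)) : Prop :=
  (head_entries.map Prod.fst).Nodup ∧ (worktree_entries.map Prod.fst).Nodup
instance (head_entries : List (String × String)) (worktree_entries : List (String × String)) : Decidable (Pre_summarize_changes head_entries worktree_entries) := by unfold Pre_summarize_changes; infer_instance
def pvWitness_summarize_changes : (List (String × String)) × (List (String × String)) :=
  ([("a", "1"), ("b", "2")], [("a", "1"), ("c", "3")])

def Spec_summarize_changes (head_entries : List (String × String)) (worktree_entries : List (String × String)) (out : String) : Prop := out = summarize_changes_alt head_entries worktree_entries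
instance (head_entries : List (String × String)) (worktree_entries : List (String × String)) (out : String) : Decidable (Spec_summarize_changes head_entries worktree_entries out) := by unfold Spec_summarize_changes; infer_instance

-- ===== CLAIM (what is proved, stated in full; the proofs are below) =====
def Claim_equal_summarize_changes : Prop := ∀ (head_entries : List (String × String)) (worktree_entries : List (String × String)), Dom_summarize_changes head_entries worktree_entries → Pre_summarize_changes head_entries worktree_entries → Spec_summarize_changes head_entries worktree_entries (summarize_changes head_entries worktree_entries)

-- ===== LEMMAS AND PROOFS =====

def pvUpd (ws : List (String × String)) (p : String × String) : Bool :=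
  match List.lookup p.1 ws with
  | some wv => decide (p.2 ≠ wv)
  | none => false

-- two strictly increasing lists with the same members are equal
theorem pv_strict_eq {l1 l2 : List String}
    (h1 : l1.Pairwise (· < ·)) (h2 : l2.Pairwise (· < ·))
    (hm : ∀ a, a ∈ l1 ↔ a ∈ l2) : l1 = l2 := by
  have hp : l1.Perm l2 :=
    (List.perm_ext_iff_of_nodup (h1.imp ne_of_lt) (h2.imp ne_of_lt)).2 hm
  exact hp.eq_of_pairwise
    (fun a b _ _ hab hba => absurd (lt_trans hab hba) (lt_irrefl a)) h1 h2

-- sorted of a Nodup list is strictly increasing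
theorem pv_sorted_strict (xs : List String) (h : xs.Nodup) :
    (PySem.List.sorted xs (fun x => x) false).Pairwise (· < ·) := by
  have hle := PySem.List.sorted_pairwise xs (fun x => x)
  have hnd : (PySem.List.sorted xs (fun x => x) false).Nodup :=
    ((PySem.List.sorted_perm xs (fun x => x) false).nodup_iff).2 h
  exact (hle.and hnd).imp (fun hab => lt_of_le_of_ne hab.1 hab.2)

-- sorting an assoc list with distinct keys by key gives strictly increasing keys
theorem pv_sorted_strict_pairs (xs : List (String × String)) (h : (xs.map Prod.fst).Nodup) :
    (PySem.List.sorted xs (fun kv => kv.1) false).Pairwise (fun a b => a.1 < b.1) := by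
  have hle := PySem.List.sorted_pairwise xs (fun kv => kv.1)
  have hnd : ((PySem.List.sorted xs (fun kv => kv.1) false).map Prod.fst).Nodup :=
    (((PySem.List.sorted_perm xs (fun kv => kv.1) false).map Prod.fst).nodup_iff).2 h
  have hne : (PySem.List.sorted xs (fun kv => kv.1) false).Pairwise (fun a b => a.1 ≠ b.1) :=
    (List.pairwise_map).1 hnd
  exact (hle.and hne).imp (fun hab => lt_of_le_of_ne hab.1 hab.2)

theorem pv_lookup_none (l : List (String × String)) (k : String) :
    List.lookup k l = none ↔ k ∉ l.map Prod.fst := by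
  induction l with
  | nil => simp
  | cons p l ih =>
      obtain ⟨a, b⟩ := p
      by_cases hk : k = a
      · subst hk; simp [List.lookup]
      · simp [List.lookup, beq_eq_false_iff_ne.2 hk, ih, hk]

theorem pv_lookup_some (l : List (String × String)) (k v : String)
    (h : (l.map Prod.fst).Nodup) : List.lookup k l = some v ↔ (k, v) ∈ l := by
  induction l with
  | nil => simp
  | cons p l ih =>
      obtain ⟨a, b⟩ := p
      simp only [List.map_cons, List.nodup_cons] at h
      by_cases hk : k = a
      · subst hk
        have : (k, v) ∉ l := fun hm => h.1 (List.mem_map.2 ⟨(k, v), hm, rfl⟩)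
        simp [List.lookup, this, eq_comm]
      · simp [List.lookup, beq_eq_false_iff_ne.2 hk, ih h.2, hk, Prod.ext_iff]

-- the merge-join fold characterised as three filters over the sorted item lists
theorem pvMergeLoop_eq (hs ws : List (String × String))
    (acc : List String × List String × List String)
    (hh : hs.Pairwise (fun a b => a.1 < b.1)) (hw : ws.Pairwise (fun a b => a.1 < b.1)) :
    pvMergeLoop hs ws acc =
      (acc.1 ++ (ws.filter (fun p => (List.lookup p.1 hs).isNone)).map Prod.fst,
       acc.2.1 ++ (hs.filter (pvUpd ws)).map Prod.fst,
       acc.2.2 ++ (hs.filter (fun p => (List.lookup p.1 ws).isNone)).map Prod.fst) := by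
  induction hs, ws, acc using pvMergeLoop.induct with
  | case1 ws acc =>
      simp [pvMergeLoop]
  | case2 hs acc hne =>
      cases hs with
      | nil => exact absurd rfl hne
      | cons a t => simp [pvMergeLoop, pvUpd]
  | case3 hk hv hs wk wv ws acc hlt ih =>
      have hhd : ∀ p ∈ hs, hk < p.1 := fun p hp => (List.pairwise_cons.1 hh).1 p hp
      have hwall : ∀ p ∈ (wk, wv) :: ws, hk < p.1 := by
        intro p hp
        rcases List.mem_cons.1 hp with h1 | h1
        · subst h1; exact hlt
        · exact lt_trans hlt ((List.pairwise_cons.1 hw).1 p h1)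
      rw [pvMergeLoop]; simp only [if_pos hlt]
      rw [ih (List.pairwise_cons.1 hh).2 hw]
      refine Prod.ext ?_ (Prod.ext ?_ ?_)
      · simp only []
        congr 2
        apply List.filter_congr
        intro p hp
        have : ¬ (p.1 == hk) := by
          simp only [beq_iff_eq]; exact fun e => absurd (e ▸ hwall p hp) (lt_irrefl _)
        simp [List.lookup, this]
      · simp only []
        have hhead : pvUpd ((wk, wv) :: ws) (hk, hv) = false := by
          have : List.lookup hk ((wk, wv) :: ws) = none := by
            rw [pv_lookup_none]
            intro hm
            rcases List.mem_map.1 hm with ⟨p, hp, he⟩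
            exact absurd (he ▸ hwall p hp) (lt_irrefl _)
          simp [pvUpd, this]
        rw [List.filter_cons_of_neg (by simp [hhead])]
      · simp only []
        have hhead : List.lookup hk ((wk, wv) :: ws) = none := by
          rw [pv_lookup_none]
          intro hm
          rcases List.mem_map.1 hm with ⟨p, hp, he⟩
          exact absurd (he ▸ hwall p hp) (lt_irrefl _)
        rw [List.filter_cons_of_pos (by simp [hhead])]
        simp
  | case4 hk hv hs wk wv ws acc hnlt hlt ih =>
      have hwd : ∀ p ∈ ws, wk < p.1 := fun p hp => (List.pairwise_cons.1 hw).1 p hp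
      have hhall : ∀ p ∈ (hk, hv) :: hs, wk < p.1 := by
        intro p hp
        rcases List.mem_cons.1 hp with h1 | h1
        · subst h1; exact hlt
        · exact lt_trans hlt ((List.pairwise_cons.1 hh).1 p h1)
      rw [pvMergeLoop]; simp only [if_neg hnlt, if_pos hlt]
      rw [ih hh (List.pairwise_cons.1 hw).2]
      refine Prod.ext ?_ (Prod.ext ?_ ?_)
      · simp only []
        have hhead : List.lookup wk ((hk, hv) :: hs) = none := by
          rw [pv_lookup_none]
          intro hm
          rcases List.mem_map.1 hm with ⟨p, hp, he⟩
          exact absurd (he ▸ hhall p hp) (lt_irrefl _)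
        rw [List.filter_cons_of_pos (by simp [hhead])]
        simp
      · simp only []
        congr 2
        apply List.filter_congr
        intro p hp
        have hne : ¬ (p.1 == wk) := by
          simp only [beq_iff_eq]; exact fun e => absurd (e ▸ hhall p hp) (lt_irrefl _)
        simp [pvUpd, List.lookup, hne]
      · simp only []
        congr 2
        apply List.filter_congr
        intro p hp
        have hne : ¬ (p.1 == wk) := by
          simp only [beq_iff_eq]; exact fun e => absurd (e ▸ hhall p hp) (lt_irrefl _)
        simp [List.lookup, hne]
  | case5 hk hv hs wk wv ws acc hnlt hnlt2 ih =>
      have heq : hk = wk := le_antisymm (not_lt.1 hnlt2) (not_lt.1 hnlt)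
      subst heq
      have hhd : ∀ p ∈ hs, hk < p.1 := fun p hp => (List.pairwise_cons.1 hh).1 p hp
      have hwd : ∀ p ∈ ws, hk < p.1 := fun p hp => (List.pairwise_cons.1 hw).1 p hp
      rw [pvMergeLoop]; simp only [if_neg hnlt]
      have ih' := ih (List.pairwise_cons.1 hh).2 (List.pairwise_cons.1 hw).2
      simp only [dite_eq_ite] at ih'
      rw [ih']
      refine Prod.ext ?_ (Prod.ext ?_ ?_)
      · simp only []
        rw [List.filter_cons_of_neg (by simp [List.lookup])]
        congr 2
        apply List.filter_congr
        intro p hp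
        have hne : ¬ (p.1 == hk) := by
          simp only [beq_iff_eq]; exact fun e => absurd (e ▸ hwd p hp) (lt_irrefl _)
        simp [List.lookup, hne]
      · simp only []
        have hhead : pvUpd ((hk, wv) :: ws) (hk, hv) = decide (hv ≠ wv) := by
          simp [pvUpd, List.lookup]
        have htail : (hs.filter (pvUpd ((hk, wv) :: ws))) = hs.filter (pvUpd ws) := by
          apply List.filter_congr
          intro p hp
          have hne : ¬ (p.1 == hk) := by
            simp only [beq_iff_eq]; exact fun e => absurd (e ▸ hhd p hp) (lt_irrefl _)
          simp [pvUpd, List.lookup, hne]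
        by_cases hdv : hv ≠ wv
        · rw [List.filter_cons_of_pos (by simp [hhead, hdv]), htail, if_pos hdv]
          simp
        · rw [List.filter_cons_of_neg (by simp [hhead, hdv]), htail, if_neg hdv]
      · simp only []
        rw [List.filter_cons_of_neg (by simp [List.lookup])]
        congr 2
        apply List.filter_congr
        intro p hp
        have hne : ¬ (p.1 == hk) := by
          simp only [beq_iff_eq]; exact fun e => absurd (e ▸ hhd p hp) (lt_irrefl _)
        simp [List.lookup, hne]

-- get? of a literal dict with distinct keys is association-list membership
theorem pv_get?_mk (l : List (String × String)) (k v : String)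
    (h : (l.map Prod.fst).Nodup) : (PySem.Dict.mk l).get? k = some v ↔ (k, v) ∈ l := by
  exact PySem.Dict.get?_eq_some_iff_mem_items (PySem.Dict.mk l) k v h

theorem summarize_eq (h w : List (String × String))
    (hh : (h.map Prod.fst).Nodup) (hw : (w.map Prod.fst).Nodup) :
    summarize_changes h w = summarize_changes_alt h w := by
  -- the two sorted item lists of B
  set HS := PySem.List.sorted h (fun kv => kv.1) false with hHS
  set WS := PySem.List.sorted w (fun kv => kv.1) false with hWS
  have hpermH : (HS.map Prod.fst).Perm (h.map Prod.fst) :=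
    (PySem.List.sorted_perm h (fun kv => kv.1) false).map Prod.fst
  have hpermW : (WS.map Prod.fst).Perm (w.map Prod.fst) :=
    (PySem.List.sorted_perm w (fun kv => kv.1) false).map Prod.fst
  have hndHS : (HS.map Prod.fst).Nodup := hpermH.nodup_iff.2 hh
  have hndWS : (WS.map Prod.fst).Nodup := hpermW.nodup_iff.2 hw
  have hsH : HS.Pairwise (fun a b => a.1 < b.1) := pv_sorted_strict_pairs h hh
  have hsW : WS.Pairwise (fun a b => a.1 < b.1) := pv_sorted_strict_pairs w hw
  have hmemHS : ∀ p : String × String, p ∈ HS ↔ p ∈ h :=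
    fun p => PySem.List.mem_sorted h (fun kv => kv.1) false p
  have hmemWS : ∀ p : String × String, p ∈ WS ↔ p ∈ w :=
    fun p => PySem.List.mem_sorted w (fun kv => kv.1) false p
  -- B's three buckets
  set Badd := (WS.filter (fun p => (List.lookup p.1 HS).isNone)).map Prod.fst with hBa
  set Bupd := (HS.filter (pvUpd WS)).map Prod.fst with hBu
  set Brem := (HS.filter (fun p => (List.lookup p.1 WS).isNone)).map Prod.fst with hBr
  have hpBa : Badd.Pairwise (· < ·) := (List.pairwise_map).2 ((hsW.filter _))
  have hpBu : Bupd.Pairwise (· < ·) := (List.pairwise_map).2 ((hsH.filter _))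
  have hpBr : Brem.Pairwise (· < ·) := (List.pairwise_map).2 ((hsH.filter _))
  have memBa : ∀ a, a ∈ Badd ↔ a ∈ w.map Prod.fst ∧ a ∉ h.map Prod.fst := by
    intro a
    constructor
    · intro hm
      rcases List.mem_map.1 hm with ⟨p, hp, rfl⟩
      rcases List.mem_filter.1 hp with ⟨hpW, hlk⟩
      refine ⟨List.mem_map.2 ⟨p, (hmemWS p).1 hpW, rfl⟩, ?_⟩
      have hn : List.lookup p.1 HS = none := by
        cases hl : List.lookup p.1 HS with
        | none => rfl
        | some v => rw [hl] at hlk; simp at hlk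
      exact fun hmem => (pv_lookup_none HS p.1).1 hn (hpermH.mem_iff.2 hmem)
    · rintro ⟨haw, hah⟩
      rcases List.mem_map.1 haw with ⟨p, hpw, rfl⟩
      refine List.mem_map.2 ⟨p, List.mem_filter.2 ⟨(hmemWS p).2 hpw, ?_⟩, rfl⟩
      have hn : List.lookup p.1 HS = none :=
        (pv_lookup_none HS p.1).2 (fun hm => hah (hpermH.mem_iff.1 hm))
      simp [hn]
  have memBr : ∀ a, a ∈ Brem ↔ a ∈ h.map Prod.fst ∧ a ∉ w.map Prod.fst := by
    intro a
    constructor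
    · intro hm
      rcases List.mem_map.1 hm with ⟨p, hp, rfl⟩
      rcases List.mem_filter.1 hp with ⟨hpH, hlk⟩
      refine ⟨List.mem_map.2 ⟨p, (hmemHS p).1 hpH, rfl⟩, ?_⟩
      have hn : List.lookup p.1 WS = none := by
        cases hl : List.lookup p.1 WS with
        | none => rfl
        | some v => rw [hl] at hlk; simp at hlk
      exact fun hmem => (pv_lookup_none WS p.1).1 hn (hpermW.mem_iff.2 hmem)
    · rintro ⟨hah, haw⟩
      rcases List.mem_map.1 hah with ⟨p, hph, rfl⟩
      refine List.mem_map.2 ⟨p, List.mem_filter.2 ⟨(hmemHS p).2 hph, ?_⟩, rfl⟩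
      have hn : List.lookup p.1 WS = none :=
        (pv_lookup_none WS p.1).2 (fun hm => haw (hpermW.mem_iff.1 hm))
      simp [hn]
  have memBu : ∀ a, a ∈ Bupd ↔ ∃ v wv, (a, v) ∈ h ∧ (a, wv) ∈ w ∧ v ≠ wv := by
    intro a
    constructor
    · intro hm
      rcases List.mem_map.1 hm with ⟨p, hp, rfl⟩
      rcases List.mem_filter.1 hp with ⟨hpH, hup⟩
      cases hl : List.lookup p.1 WS with
      | none => rw [pvUpd, hl] at hup; simp at hup
      | some wv =>
        refine ⟨p.2, wv, (hmemHS p).1 hpH, ?_, ?_⟩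
        · exact (hmemWS _).1 ((pv_lookup_some WS p.1 wv hndWS).1 hl)
        · rw [pvUpd, hl] at hup; simpa using hup
    · rintro ⟨v, wv, hvh, hww, hne⟩
      have hHSm : (a, v) ∈ HS := (hmemHS _).2 hvh
      have hl : List.lookup a WS = some wv :=
        (pv_lookup_some WS a wv hndWS).2 ((hmemWS _).2 hww)
      refine List.mem_map.2 ⟨(a, v), List.mem_filter.2 ⟨hHSm, ?_⟩, rfl⟩
      rw [pvUpd, hl]; simpa using hne
  -- A's three lists
  have ndOfH : (PySem.Set.ofList (h.map Prod.fst) : List String).Nodup := PySem.Set.nodup_ofList _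
  have ndOfW : (PySem.Set.ofList (w.map Prod.fst) : List String).Nodup := PySem.Set.nodup_ofList _
  have eA : PySem.List.sorted (PySem.Set.diff (PySem.Set.ofList (w.map Prod.fst)) (PySem.Set.ofList (h.map Prod.fst))) (fun x => x) false = Badd := by
    refine pv_strict_eq (pv_sorted_strict _ (PySem.Set.nodup_diff _ _ ndOfW)) hpBa ?_
    intro a
    rw [memBa]
    simp [PySem.List.mem_sorted, PySem.Set.mem_diff, PySem.Set.mem_ofList]
  have eR : PySem.List.sorted (PySem.Set.diff (PySem.Set.ofList (h.map Prod.fst)) (PySem.Set.ofList (w.map Prod.fst))) (fun x => x) false = Brem := by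
    refine pv_strict_eq (pv_sorted_strict _ (PySem.Set.nodup_diff _ _ ndOfH)) hpBr ?_
    intro a
    rw [memBr]
    simp [PySem.List.mem_sorted, PySem.Set.mem_diff, PySem.Set.mem_ofList]
  have eU : (PySem.List.sorted (PySem.Set.inter (PySem.Set.ofList (h.map Prod.fst)) (PySem.Set.ofList (w.map Prod.fst))) (fun x => x) false).filter
      (fun s => decide ((PySem.Dict.mk h).get? s ≠ (PySem.Dict.mk w).get? s)) = Bupd := by
    refine pv_strict_eq ((pv_sorted_strict _ (PySem.Set.nodup_inter _ _ ndOfH)).filter _) hpBu ?_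
    intro a
    rw [memBu]
    simp only [List.mem_filter, PySem.List.mem_sorted, PySem.Set.mem_inter,
      PySem.Set.mem_ofList, decide_eq_true_eq]
    constructor
    · rintro ⟨⟨hah, haw⟩, hne⟩
      rcases List.mem_map.1 hah with ⟨p, hph, rfl⟩
      rcases List.mem_map.1 haw with ⟨q, hqw, hq⟩
      have hgh : (PySem.Dict.mk h).get? p.1 = some p.2 := (pv_get?_mk h p.1 p.2 hh).2 hph
      have hgw : (PySem.Dict.mk w).get? p.1 = some q.2 := by
        rw [pv_get?_mk w p.1 q.2 hw, ← hq]; exact hqw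
      refine ⟨p.2, q.2, hph, by rw [← hq]; exact hqw, ?_⟩
      intro he
      exact hne (by rw [hgh, hgw, he])
    · rintro ⟨v, wv, hvh, hww, hne⟩
      have hgh : (PySem.Dict.mk h).get? a = some v := (pv_get?_mk h a v hh).2 hvh
      have hgw : (PySem.Dict.mk w).get? a = some wv := (pv_get?_mk w a wv hw).2 hww
      refine ⟨⟨List.mem_map.2 ⟨(a, v), hvh, rfl⟩, List.mem_map.2 ⟨(a, wv), hww, rfl⟩⟩, ?_⟩
      rw [hgh, hgw]
      simpa using hne
  -- assemble
  simp only [summarize_changes, summarize_changes_alt, PySem.List.foldl_append_ite_eq_filter]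
  rw [pvMergeLoop_eq _ _ _ hsH hsW]
  simp only [List.nil_append]
  rw [eA, eR, eU]

-- ===== VERDICT (by name: the statement is the Claim_ definition above) =====
theorem summarize_changes_spec : Claim_equal_summarize_changes := by
  intro h w _ hpre
  unfold Spec_summarize_changes
  exact summarize_eq h w hpre.1 hpre.2
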